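-- pv_equiv track=rewrite | github.com/yunchan312/Algorithm-Study | 이것이코딩테스트다/Simulation/치킨배달.py | getCityChickenDist
-- ===== SOURCE A (Python) =====
-- from collections import defaultdict
-- from collections import deque
--
-- def getCloseChicken(chickens, house):
--   cur_min = 1000000000
--   theChicken = (0,0)
--   for chi_row, chi_col in chickens:
--     if cur_min > abs(chi_row-house[0]) + abs(chi_col-house[1]):
--       cur_min = abs(chi_row-house[0]) + abs(chi_col-house[1])
--       theChicken = (chi_row, chi_col)
--   return theChicken
--
-- def getChickenDist(chicken, house):
--   return abs(chicken[0]-house[0])+abs(chicken[1]-house[1])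
--
-- def getCityChickenDist(chickens, houses):
--   combi = defaultdict(deque)
--   for house in houses:
--     combi[getCloseChicken(chickens, house)].append(house)
--
--   cityChickenDist = 0
--
--   for chi_row, chi_col in combi:
--     for homes in combi[(chi_row, chi_col)]:
--       cityChickenDist += getChickenDist((chi_row, chi_col), homes)
--   return cityChickenDist
-- ===== SOURCE B (Python) =====
-- def getCityChickenDist(chickens, houses):
--     total = 0
--     for h_row, h_col in houses:
--         total += min(abs(c_row - h_row) + abs(c_col - h_col) for c_row, c_col in chickens)
--     return total
-- ===== Notes on version B (the rewrite author's own statement) =====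
-- stated objective: simpler
-- what changed: B drops A's argmin-chicken tracking and the nearest-chicken->houses grouping dict entirely and keeps a single running total, adding per house the minimum Manhattan distance over all chickens in one direct scan.
-- intended difference: On inputs with at least one chicken where some house is at Manhattan distance >= 10^9 from every chicken, A's cur_min threshold never fires and A adds that house's distance to the (0,0) sentinel instead of to any chicken, while B adds the true minimum distance, which is the intended value. — e.g. on getCityChickenDist([(2000000000, 0)], [(0, 0)]): A returns 0, B returns 2000000000
-- outside the precondition, e.g. on getCityChickenDist([], [(1, 2)]): A returns 3, B raises ValueError
import Mathlib
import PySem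

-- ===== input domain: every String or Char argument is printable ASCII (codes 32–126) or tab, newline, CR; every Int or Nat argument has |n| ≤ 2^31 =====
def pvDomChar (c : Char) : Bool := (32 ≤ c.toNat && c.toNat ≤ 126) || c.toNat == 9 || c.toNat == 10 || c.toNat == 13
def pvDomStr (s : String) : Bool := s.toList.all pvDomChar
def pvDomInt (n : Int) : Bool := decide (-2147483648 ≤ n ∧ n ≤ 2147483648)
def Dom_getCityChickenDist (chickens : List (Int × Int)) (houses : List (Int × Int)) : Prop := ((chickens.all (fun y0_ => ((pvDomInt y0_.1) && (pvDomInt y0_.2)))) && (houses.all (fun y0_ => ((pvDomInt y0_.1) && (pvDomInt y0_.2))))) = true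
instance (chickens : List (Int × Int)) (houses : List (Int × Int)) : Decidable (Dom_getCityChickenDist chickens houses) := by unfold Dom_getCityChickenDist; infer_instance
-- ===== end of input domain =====

-- B replaces A's argmin-chicken search + nearest-chicken→houses grouping dict with one running sum of per-house minimum distances (objective: simpler).


-- ===== PORT A =====
def getCloseChicken (chickens : List (Int × Int)) (house : Int × Int) : Int × Int :=
  (chickens.foldl
    (fun (st : Int × (Int × Int)) c =>
      if st.1 > |c.1 - house.1| + |c.2 - house.2| then
        (|c.1 - house.1| + |c.2 - house.2|, (c.1, c.2))
      else st)
    ((1000000000 : Int), ((0 : Int), (0 : Int)))).2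

def getChickenDist (chicken : Int × Int) (house : Int × Int) : Int :=
  |chicken.1 - house.1| + |chicken.2 - house.2|

def getCityChickenDist (chickens : List (Int × Int)) (houses : List (Int × Int)) : Int :=
  let combi : PySem.Dict (Int × Int) (List (Int × Int)) :=
    houses.foldl (fun d house => d.modify (getCloseChicken chickens house) [] (fun q => q ++ [house])) PySem.Dict.empty
  combi.keys.foldl (fun acc k =>
    (combi.getD k []).foldl (fun a homes => a + getChickenDist k homes) acc) 0

-- ===== PORT B =====
def getCityChickenDist_alt (chickens : List (Int × Int)) (houses : List (Int × Int)) : Int :=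
  houses.foldl
    (fun total h =>
      total + (PySem.List.min? (chickens.map (fun c => |c.1 - h.1| + |c.2 - h.2|)) (fun x => x)).getD 0)
    0

-- ===== PRECONDITION & SPEC =====
-- Pre_ excludes empty chickens with nonempty houses: there A sums each house's distance to its (0,0) sentinel, while B's plain min() raises ValueError.
def Pre_getCityChickenDist (chickens : List (Int × Int)) (houses : List (Int × Int)) : Prop :=
  chickens = [] → houses = []
instance (chickens : List (Int × Int)) (houses : List (Int × Int)) : Decidable (Pre_getCityChickenDist chickens houses) := by unfold Pre_getCityChickenDist; infer_instance
def pvWitness_getCityChickenDist : (List (Int × Int)) × (List (Int × Int)) := ([(0, 0)], [(1, 1)])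

-- On inputs with at least one chicken where some house is at Manhattan distance ≥ 10^9 from every chicken, A's cur_min threshold never fires and A adds that house's distance to the (0,0) sentinel instead of to any chicken, while B adds the true minimum distance, which is the intended value.
def D_getCityChickenDist (chickens : List (Int × Int)) (houses : List (Int × Int)) : Prop :=
  chickens ≠ [] ∧ ∃ h ∈ houses, ∀ c ∈ chickens, 1000000000 ≤ |c.1 - h.1| + |c.2 - h.2|
instance (chickens : List (Int × Int)) (houses : List (Int × Int)) : Decidable (D_getCityChickenDist chickens houses) := by unfold D_getCityChickenDist; infer_instance

def Spec_getCityChickenDist (chickens : List (Int × Int)) (houses : List (Int × Int)) (out : Int) : Prop := ¬ D_getCityChickenDist chickens houses → out = getCityChickenDist_alt chickens houses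
instance (chickens : List (Int × Int)) (houses : List (Int × Int)) (out : Int) : Decidable (Spec_getCityChickenDist chickens houses out) := by unfold Spec_getCityChickenDist; infer_instance

def pvDiffWitness_getCityChickenDist : (List (Int × Int)) × (List (Int × Int)) := ([(2000000000, 0)], [(0, 0)])
def pvDiffWitnessOut_getCityChickenDist : Int × Int := (0, 2000000000)

-- ===== CLAIM (what is proved, stated in full; the proofs are below) =====
def Claim_unchanged_getCityChickenDist : Prop := ∀ (chickens : List (Int × Int)) (houses : List (Int × Int)), Dom_getCityChickenDist chickens houses → Pre_getCityChickenDist chickens houses → Spec_getCityChickenDist chickens houses (getCityChickenDist chickens houses)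
def Claim_changed_getCityChickenDist : Prop := Dom_getCityChickenDist (pvDiffWitness_getCityChickenDist.1) (pvDiffWitness_getCityChickenDist.2) ∧ Pre_getCityChickenDist (pvDiffWitness_getCityChickenDist.1) (pvDiffWitness_getCityChickenDist.2) ∧ D_getCityChickenDist (pvDiffWitness_getCityChickenDist.1) (pvDiffWitness_getCityChickenDist.2) ∧ getCityChickenDist (pvDiffWitness_getCityChickenDist.1) (pvDiffWitness_getCityChickenDist.2) = pvDiffWitnessOut_getCityChickenDist.1 ∧ getCityChickenDist_alt (pvDiffWitness_getCityChickenDist.1) (pvDiffWitness_getCityChickenDist.2) = pvDiffWitnessOut_getCityChickenDist.2 ∧ pvDiffWitnessOut_getCityChickenDist.1 ≠ pvDiffWitnessOut_getCityChickenDist.2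

-- ===== LEMMAS AND PROOFS =====

-- the per-house distance of B: minimum Manhattan distance from house h to a chicken
def pvMinDist (chickens : List (Int × Int)) (h : Int × Int) : Int :=
  (PySem.List.min? (chickens.map (fun c => |c.1 - h.1| + |c.2 - h.2|)) (fun x => x)).getD 0

lemma pvFoldlMinMin (l : List Int) : ∀ a b : Int, l.foldl min (min a b) = min a (l.foldl min b) := by
  induction l with
  | nil => intro a b; rfl
  | cons x t ih =>
    intro a b
    simp only [List.foldl_cons, min_assoc]
    exact ih a (min b x)

-- the inner loop of getCloseChicken: the running minimum is the fold of min, and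
-- either the state never moved or the kept chicken realises the running minimum
lemma pvCloseLoop (house : Int × Int) (l : List (Int × Int)) :
    ∀ (m : Int) (b : Int × Int),
      (l.foldl
        (fun (st : Int × (Int × Int)) c =>
          if st.1 > |c.1 - house.1| + |c.2 - house.2| then
            (|c.1 - house.1| + |c.2 - house.2|, (c.1, c.2))
          else st) (m, b)).1
        = l.foldl (fun a c => min a (|c.1 - house.1| + |c.2 - house.2|)) m ∧
      ((l.foldl
        (fun (st : Int × (Int × Int)) c =>
          if st.1 > |c.1 - house.1| + |c.2 - house.2| then
            (|c.1 - house.1| + |c.2 - house.2|, (c.1, c.2))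
          else st) (m, b)) = (m, b) ∨
       getChickenDist
        (l.foldl
          (fun (st : Int × (Int × Int)) c =>
            if st.1 > |c.1 - house.1| + |c.2 - house.2| then
              (|c.1 - house.1| + |c.2 - house.2|, (c.1, c.2))
            else st) (m, b)).2 house
        = (l.foldl
            (fun (st : Int × (Int × Int)) c =>
              if st.1 > |c.1 - house.1| + |c.2 - house.2| then
                (|c.1 - house.1| + |c.2 - house.2|, (c.1, c.2))
              else st) (m, b)).1) := by
  induction l with
  | nil => intro m b; exact ⟨rfl, Or.inl rfl⟩
  | cons c t ih =>
    intro m b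
    simp only [List.foldl_cons]
    by_cases hc : m > |c.1 - house.1| + |c.2 - house.2|
    · rw [if_pos hc]
      have hmin : min m (|c.1 - house.1| + |c.2 - house.2|) = |c.1 - house.1| + |c.2 - house.2| := by omega
      rcases ih (|c.1 - house.1| + |c.2 - house.2|) (c.1, c.2) with ⟨h1, h2⟩
      refine ⟨by rw [h1, hmin], ?_⟩
      rcases h2 with h2 | h2
      · right; rw [h2]; simp [getChickenDist]
      · right; exact h2
    · rw [if_neg hc]
      have hmin : min m (|c.1 - house.1| + |c.2 - house.2|) = m := by omega
      rcases ih m b with ⟨h1, h2⟩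
      exact ⟨by rw [h1, hmin], h2⟩

-- per house: when some chicken is strictly closer than the 10^9 threshold,
-- A's chosen chicken realises exactly B's minimum distance
lemma pvCloseDist (chickens : List (Int × Int)) (h : Int × Int)
    (hlt : ∃ c ∈ chickens, |c.1 - h.1| + |c.2 - h.2| < 1000000000) :
    getChickenDist (getCloseChicken chickens h) h = pvMinDist chickens h := by
  obtain ⟨c, hcmem, hclt⟩ := hlt
  obtain ⟨c0, rest, rfl⟩ : ∃ c0 rest, chickens = c0 :: rest := by
    cases chickens with
    | nil => simp at hcmem
    | cons a t => exact ⟨a, t, rfl⟩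
  -- B's per-house value is a running min over the distances
  have hmap : (c0 :: rest).map (fun c => |c.1 - h.1| + |c.2 - h.2|)
      = (|c0.1 - h.1| + |c0.2 - h.2|) :: rest.map (fun c => |c.1 - h.1| + |c.2 - h.2|) := rfl
  have hB : pvMinDist (c0 :: rest) h
      = (rest.map (fun c => |c.1 - h.1| + |c.2 - h.2|)).foldl min (|c0.1 - h.1| + |c0.2 - h.2|) := by
    simp [pvMinDist, hmap, PySem.List.min?_id_cons]
  -- that running min is at most the distance of the witness chicken, hence < 10^9
  have hle : pvMinDist (c0 :: rest) h ≤ |c.1 - h.1| + |c.2 - h.2| := by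
    rw [hB]
    rcases List.mem_cons.mp hcmem with rfl | hc
    · exact (PySem.List.foldl_min_le _ _).1
    · exact (PySem.List.foldl_min_le _ _).2 _ (List.mem_map_of_mem hc)
  have hBlt : pvMinDist (c0 :: rest) h < 1000000000 := lt_of_le_of_lt hle hclt
  -- A's loop state
  rcases pvCloseLoop h (c0 :: rest) 1000000000 (0, 0) with ⟨h1, h2⟩
  have hfold : (c0 :: rest).foldl (fun a c => min a (|c.1 - h.1| + |c.2 - h.2|)) 1000000000
      = min 1000000000 (pvMinDist (c0 :: rest) h) := by
    rw [hB]
    have hfm : (c0 :: rest).foldl (fun a c => min a (|c.1 - h.1| + |c.2 - h.2|)) 1000000000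
        = ((c0 :: rest).map (fun c => |c.1 - h.1| + |c.2 - h.2|)).foldl min 1000000000 := by
      simp [List.foldl_map]
    rw [hfm, hmap, List.foldl_cons, pvFoldlMinMin]
  have hfst : (( (c0 :: rest).foldl
      (fun (st : Int × (Int × Int)) c =>
        if st.1 > |c.1 - h.1| + |c.2 - h.2| then
          (|c.1 - h.1| + |c.2 - h.2|, (c.1, c.2))
        else st) (1000000000, (0, 0)))).1 = pvMinDist (c0 :: rest) h := by
    rw [h1, hfold]; omega
  rcases h2 with h2 | h2
  · exfalso
    have := hfst
    rw [h2] at this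
    simp at this
    omega
  · unfold getCloseChicken
    rw [h2, hfst]

-- grouping sum: summing a group-by-key dict group by group is summing over the original list
lemma pvGroupSum {κ H : Type} [DecidableEq κ] (key : H → κ) (g : κ → H → Int) :
    ∀ (keys : List κ) (hs : List H), keys.Nodup → (∀ x ∈ hs, key x ∈ keys) →
      (keys.map (fun k => ((hs.filter (fun x => key x = k)).map (g k)).sum)).sum
        = (hs.map (fun x => g (key x) x)).sum := by
  intro keys
  induction keys with
  | nil =>
    intro hs _ hmem
    cases hs with
    | nil => rfl
    | cons x t => exact absurd (hmem x (by simp)) (by simp)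
  | cons k0 kt ih =>
    intro hs hnd hmem
    have hnd' : kt.Nodup := hnd.of_cons
    have hk0 : k0 ∉ kt := by
      intro hk; exact (List.nodup_cons.mp hnd).1 hk
    -- split hs into the k0-group and the rest
    have hsplit : (hs.map (fun x => g (key x) x)).sum
        = ((hs.filter (fun x => key x = k0)).map (fun x => g (key x) x)).sum
          + ((hs.filter (fun x => ¬ key x = k0)).map (fun x => g (key x) x)).sum := by
      induction hs with
      | nil => rfl
      | cons y t iht =>
        by_cases hy : key y = k0 <;>
          simp [hy, iht (fun x hx => hmem x (List.mem_cons_of_mem y hx))] <;> ring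
    -- tail groups are untouched by removing the k0-group
    have htail : ∀ k ∈ kt,
        (hs.filter (fun x => key x = k)) = ((hs.filter (fun x => ¬ key x = k0)).filter (fun x => key x = k)) := by
      intro k hk
      rw [List.filter_filter]
      apply List.filter_congr
      intro x _
      by_cases hxk : key x = k
      · have hne : ¬ k = k0 := fun hkk => hk0 (hkk ▸ hk)
        simp [hxk, hne]
      · simp [hxk]
    have hrec := ih (hs.filter (fun x => ¬ key x = k0)) hnd' (by
      intro x hx
      rcases List.mem_filter.mp hx with ⟨hxs, hxk⟩
      have hne := of_decide_eq_true hxk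
      rcases List.mem_cons.mp (hmem x hxs) with h1 | h1
      · exact absurd h1 hne
      · exact h1)
    calc ((k0 :: kt).map (fun k => ((hs.filter (fun x => key x = k)).map (g k)).sum)).sum
        = ((hs.filter (fun x => key x = k0)).map (g k0)).sum
          + (kt.map (fun k => ((hs.filter (fun x => key x = k)).map (g k)).sum)).sum := by
          simp
      _ = ((hs.filter (fun x => key x = k0)).map (fun x => g (key x) x)).sum
          + ((hs.filter (fun x => ¬ key x = k0)).map (fun x => g (key x) x)).sum := by
          congr 1
          · apply congrArg
            apply List.map_congr_left
            intro x hx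
            rw [of_decide_eq_true (List.mem_filter.mp hx).2]
          · rw [← hrec]
            apply congrArg
            apply List.map_congr_left
            intro k hk
            rw [htail k hk]
      _ = (hs.map (fun x => g (key x) x)).sum := hsplit.symm

-- A's total, rewritten: the grouping dict contributes g (key h) h once per house
lemma pvA_eq_sum (chickens houses : List (Int × Int)) :
    getCityChickenDist chickens houses
      = (houses.map (fun h => getChickenDist (getCloseChicken chickens h) h)).sum := by
  unfold getCityChickenDist
  set key : (Int × Int) → (Int × Int) := fun h => getCloseChicken chickens h with hkey
  set combi : PySem.Dict (Int × Int) (List (Int × Int)) :=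
    houses.foldl (fun d house => d.modify (key house) [] (fun q => q ++ [house])) PySem.Dict.empty with hcombi
  -- keys of the grouping dict
  have hkeys : combi.keys = PySem.Set.ofList (houses.map key) := by
    rw [hcombi, PySem.Dict.keys_foldl_modify_key houses key [] (fun _ h => (fun q => q ++ [h]))]
    simp [PySem.Set.update_nil_left]
  have hnd : combi.keys.Nodup := by
    rw [hkeys]; exact PySem.Set.nodup_ofList _
  -- each group is the list of houses whose nearest chicken is that key
  have hgetD : ∀ k, combi.getD k [] = houses.filter (fun h => key h == k) := by
    intro k
    rw [hcombi]
    have hfm : houses.foldl (fun d house => d.modify (key house) [] (fun q => q ++ [house])) PySem.Dict.empty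
        = (houses.map (fun h => (key h, h))).foldl (fun d p => d.modify p.1 [] (fun q => q ++ [p.2])) PySem.Dict.empty := by
      rw [List.foldl_map]
    rw [hfm, PySem.Dict.getD_foldl_modify_append]
    simp [List.filter_map, Function.comp_def]
  -- fold-with-+ is a sum
  have hsum : combi.keys.foldl (fun acc k =>
        (combi.getD k []).foldl (fun a homes => a + getChickenDist k homes) acc) 0
      = (combi.keys.map (fun k => ((combi.getD k []).map (getChickenDist k)).sum)).sum := by
    have : ∀ (ks : List (Int × Int)) (a : Int), ks.foldl (fun acc k =>
          (combi.getD k []).foldl (fun a homes => a + getChickenDist k homes) acc) a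
        = a + (ks.map (fun k => ((combi.getD k []).map (getChickenDist k)).sum)).sum := by
      intro ks
      induction ks with
      | nil => intro a; simp
      | cons k t iht =>
        intro a
        simp only [List.foldl_cons, List.map_cons, List.sum_cons]
        rw [iht, PySem.List.foldl_add]
        ring
    rw [this]; ring
  rw [hsum]
  -- plug in keys and groups, then apply the grouping lemma
  have hmem : ∀ h ∈ houses, key h ∈ combi.keys := by
    intro h hh
    rw [hkeys, PySem.Set.mem_ofList]
    exact List.mem_map_of_mem hh
  have := pvGroupSum key (fun k h => getChickenDist k h) combi.keys houses hnd hmem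
  rw [← this]
  apply congrArg
  apply List.map_congr_left
  intro k _
  rw [hgetD k]
  have hpe : (fun h0 => key h0 == k) = (fun h0 => decide (key h0 = k)) := by
    funext h0; by_cases hx : key h0 = k <;> simp [hx]
  rw [hpe]

-- B's total is the sum of per-house minimum distances
lemma pvB_eq_sum (chickens houses : List (Int × Int)) :
    getCityChickenDist_alt chickens houses = (houses.map (pvMinDist chickens)).sum := by
  show houses.foldl (fun total h => total + pvMinDist chickens h) 0 = _
  rw [PySem.List.foldl_add houses (fun h => pvMinDist chickens h) 0]
  simp

-- ===== VERDICT (by name: the statement is the Claim_ definition above) =====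
theorem getCityChickenDist_spec : Claim_unchanged_getCityChickenDist := by
  intro chickens houses _ hpre
  unfold Spec_getCityChickenDist
  intro hnd
  rcases eq_or_ne chickens [] with hc | hc
  · subst hc
    rw [hpre rfl]
    rfl
  rw [pvA_eq_sum, pvB_eq_sum]
  apply congrArg
  apply List.map_congr_left
  intro h hh
  apply pvCloseDist
  by_contra hall
  exact hnd ⟨hc, h, hh, fun c hcm => le_of_not_gt fun hlt => hall ⟨c, hcm, hlt⟩⟩

theorem getCityChickenDist_changed : Claim_changed_getCityChickenDist := by
  unfold Claim_changed_getCityChickenDist; decide
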